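-- pv_equiv track=rewrite | github.com/mdnurahmed/wordle-helper | suggester.py | yellowOk
-- ===== SOURCE A (Python) =====
-- from collections import defaultdict
--
-- def yellowOk(word, yellow):
--     f = defaultdict(int)
--     for ch in word:
--         f[ch] += 1
--     for ch in yellow:
--         if yellow[ch] != f[ch]:
--             return False
--     return True
-- ===== SOURCE B (Python) =====
-- def yellowOk(word, yellow):
--     rem = dict(yellow)
--     for ch in word:
--         if ch in rem:
--             rem[ch] -= 1
--     return not any(rem.values())
-- ===== Notes on version B (the rewrite author's own statement) =====
-- stated objective: alternative
-- what changed: Instead of building a frequency table of the word and then comparing it key by key against yellow, B copies yellow as a residual-count dict, makes one pass over the word decrementing the residual of each tracked letter, and succeeds iff every residual ended at exactly zero.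
import Mathlib
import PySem

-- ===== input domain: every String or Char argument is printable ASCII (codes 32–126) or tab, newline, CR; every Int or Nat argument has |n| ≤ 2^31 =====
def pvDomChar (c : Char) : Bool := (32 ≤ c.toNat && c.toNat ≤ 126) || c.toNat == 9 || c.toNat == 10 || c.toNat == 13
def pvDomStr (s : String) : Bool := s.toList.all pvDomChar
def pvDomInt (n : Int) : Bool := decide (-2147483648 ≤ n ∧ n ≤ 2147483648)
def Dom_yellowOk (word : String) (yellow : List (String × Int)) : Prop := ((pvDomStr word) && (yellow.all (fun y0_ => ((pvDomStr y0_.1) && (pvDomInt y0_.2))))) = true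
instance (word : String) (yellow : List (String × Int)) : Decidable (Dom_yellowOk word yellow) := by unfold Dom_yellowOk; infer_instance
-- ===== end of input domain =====

-- B replaces A's count-then-compare (frequency table of the word, then a key-by-key check) by a
-- residual-decrement pass: copy yellow, decrement per word letter, succeed iff all residuals are zero (objective: alternative).

-- ===== PORT A =====
-- the second loop of A: 'for ch in yellow: if yellow[ch] != f[ch]: return False' then 'return True'
def yellowOkLoop (yd f : PySem.Dict String Int) : List String → Bool
  | [] => true
  | ch :: ks => if yd.getD ch 0 ≠ f.getD ch 0 then false else yellowOkLoop yd f ks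

def yellowOk (word : String) (yellow : List (String × Int)) : Bool :=
  -- 'for ch in word: f[ch] += 1' (each ch is a one-character string in Python)
  let f : PySem.Dict String Int :=
    (word.toList.map String.singleton).foldl (fun d ch => d.modify ch 0 (· + 1)) PySem.Dict.empty
  let yd : PySem.Dict String Int := PySem.Dict.mk yellow
  yellowOkLoop yd f yd.keys

-- ===== PORT B =====
-- the body of B's loop: 'if ch in rem: rem[ch] -= 1'
def remStep (d : PySem.Dict String Int) (c : Char) : PySem.Dict String Int :=
  if d.contains (String.singleton c) then d.modify (String.singleton c) 0 (· - 1) else d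

def yellowOk_alt (word : String) (yellow : List (String × Int)) : Bool :=
  -- rem = dict(yellow); for ch in word: if ch in rem: rem[ch] -= 1; return not any(rem.values())
  let rem : PySem.Dict String Int := word.toList.foldl remStep (PySem.Dict.mk yellow)
  !(rem.values.any (fun v => v != 0))

-- ===== PRECONDITION & SPEC =====
-- Pre_ excludes association lists with duplicate keys, which cannot arise from a Python dict argument.
def Pre_yellowOk (word : String) (yellow : List (String × Int)) : Prop :=
  (yellow.map Prod.fst).Nodup

instance (word : String) (yellow : List (String × Int)) : Decidable (Pre_yellowOk word yellow) := by
  unfold Pre_yellowOk; infer_instance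

def pvWitness_yellowOk : String × (List (String × Int)) := ("hello", [("l", 2), ("h", 1)])

def Spec_yellowOk (word : String) (yellow : List (String × Int)) (out : Bool) : Prop := out = yellowOk_alt word yellow
instance (word : String) (yellow : List (String × Int)) (out : Bool) : Decidable (Spec_yellowOk word yellow out) := by unfold Spec_yellowOk; infer_instance

-- ===== CLAIM (what is proved, stated in full; the proofs are below) =====
def Claim_equal_yellowOk : Prop := ∀ (word : String) (yellow : List (String × Int)), Dom_yellowOk word yellow → Pre_yellowOk word yellow → Spec_yellowOk word yellow (yellowOk word yellow)

-- ===== LEMMAS AND PROOFS =====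

theorem keys_remStep (d : PySem.Dict String Int) (c : Char) :
    (remStep d c).keys = d.keys := by
  unfold remStep
  split
  · rename_i h
    rw [PySem.Dict.keys_modify, PySem.Dict.keys_insert_of_contains _ _ h]
  · rfl

theorem keys_foldl_remStep (l : List Char) (d : PySem.Dict String Int) :
    (l.foldl remStep d).keys = d.keys := by
  induction l generalizing d with
  | nil => rfl
  | cons c l ih => rw [List.foldl_cons, ih, keys_remStep]

theorem getD_foldl_remStep (l : List Char) (d : PySem.Dict String Int) (k : String) :
    (l.foldl remStep d).getD k 0
      = d.getD k 0 - (if d.contains k then ((l.map String.singleton).count k : Int) else 0) := by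
  induction l generalizing d with
  | nil => simp
  | cons c l ih =>
      rw [List.foldl_cons, ih]
      have hc : (remStep d c).contains k = d.contains k := by
        rw [PySem.Dict.contains_eq_decide_mem_keys, PySem.Dict.contains_eq_decide_mem_keys,
          keys_remStep]
      rw [hc]
      by_cases hk : k = String.singleton c
      · subst hk
        by_cases h : d.contains (String.singleton c)
        · have hg : (remStep d c).getD (String.singleton c) 0
              = d.getD (String.singleton c) 0 - 1 := by
            unfold remStep
            rw [if_pos h, PySem.Dict.getD_modify, if_pos rfl]
          rw [hg]
          simp only [h, List.map_cons, List.count_cons, beq_self_eq_true, if_pos]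
          push_cast
          ring
        · have hg : remStep d c = d := by unfold remStep; rw [if_neg h]
          rw [hg]
          simp [h]
      · have hg : (remStep d c).getD k 0 = d.getD k 0 := by
          unfold remStep
          split
          · rw [PySem.Dict.getD_modify, if_neg hk]
          · rfl
        rw [hg]
        have hcnt : (List.map String.singleton (c :: l)).count k
            = (List.map String.singleton l).count k := by
          simp [Ne.symm hk]
        rw [hcnt]

theorem notany_eq_all {α : Type} (l : List α) (p : α → Bool) :
    (!(l.any p)) = l.all (fun a => !(p a)) := by
  induction l with
  | nil => rfl
  | cons a l ih => simp [List.any_cons, List.all_cons, ih, Bool.not_or]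

theorem all_congr_mem {α : Type} (l : List α) (p q : α → Bool)
    (h : ∀ a ∈ l, p a = q a) : l.all p = l.all q := by
  induction l with
  | nil => rfl
  | cons a l ih =>
      simp only [List.all_cons, h a (List.mem_cons_self ..),
        ih (fun b hb => h b (List.mem_cons_of_mem a hb))]

theorem beq_eq_not_sub_bne (a c : Int) : (a == c) = !(a - c != 0) := by
  by_cases h : a = c
  · simp [h]
  · simp only [bne, Bool.not_not]
    rw [show (a == c) = false from beq_eq_false_iff_ne.mpr h,
        show ((a - c : Int) == 0) = false from beq_eq_false_iff_ne.mpr (by omega)]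

theorem yellowOkLoop_eq_all (yd f : PySem.Dict String Int) (ks : List String) :
    yellowOkLoop yd f ks = ks.all (fun k => yd.getD k 0 == f.getD k 0) := by
  induction ks with
  | nil => rfl
  | cons k ks ih =>
      simp only [yellowOkLoop, List.all_cons, ih]
      by_cases h : yd.getD k 0 = f.getD k 0 <;> simp [h]

-- ===== VERDICT (by name: the statement is the Claim_ definition above) =====
theorem yellowOk_spec : Claim_equal_yellowOk := by
  intro word yellow _hdom hpre
  unfold Spec_yellowOk yellowOk yellowOk_alt
  rw [yellowOkLoop_eq_all]
  have hnd : (PySem.Dict.mk yellow).keys.Nodup := hpre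
  have hrkeys := keys_foldl_remStep word.toList (PySem.Dict.mk yellow)
  have hvals := PySem.Dict.values_eq_map_keys
    (word.toList.foldl remStep (PySem.Dict.mk yellow)) (by rw [hrkeys]; exact hnd) 0
  show _ = !((word.toList.foldl remStep (PySem.Dict.mk yellow)).values.any (fun v => v != 0))
  rw [hvals, hrkeys, List.any_map, notany_eq_all]
  apply all_congr_mem
  intro k hk
  have hcont : (PySem.Dict.mk yellow).contains k = true := by
    rw [PySem.Dict.contains_eq_decide_mem_keys]; exact decide_eq_true hk
  have hf : ((word.toList.map String.singleton).foldl
      (fun d ch => d.modify ch 0 (· + 1)) PySem.Dict.empty : PySem.Dict String Int).getD k 0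
      = ((word.toList.map String.singleton).count k : Int) := by
    rw [PySem.Dict.getD_foldl_modify_add_one, PySem.Dict.getD_empty]
    ring
  have hr : (word.toList.foldl remStep (PySem.Dict.mk yellow)).getD k 0
      = (PySem.Dict.mk yellow).getD k 0 - ((word.toList.map String.singleton).count k : Int) := by
    rw [getD_foldl_remStep, hcont, if_pos rfl]
  show _ = !((word.toList.foldl remStep (PySem.Dict.mk yellow)).getD k 0 != 0)
  rw [hf, hr]
  exact beq_eq_not_sub_bne _ _
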